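-- pv_equiv track=rewrite | github.com/pjmartos/stemmata | src/stemmata/interp.py | _parse_placeholder_tokens
-- ===== SOURCE A (Python) =====
-- def _parse_placeholder_tokens(text: str) -> list[tuple[str, str, int]]:
--     tokens: list[tuple[str, str, int]] = []
--     i = 0
--     while i < len(text):
--         start = i
--         if text[i] == "$" and i + 1 < len(text) and text[i + 1] == "$":
--             if i + 2 < len(text) and text[i + 2] == "{":
--                 j = text.find("}", i + 3)
--                 if j == -1:
--                     tokens.append(("text", text[i], start))
--                     i += 1
--                     continue
--                 tokens.append(("escape", text[i + 2:j + 1], start))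
--                 i = j + 1
--                 continue
--             tokens.append(("text", "$", start))
--             i += 2
--             continue
--         if text[i] == "$" and i + 1 < len(text) and text[i + 1] == "{":
--             j = text.find("}", i + 2)
--             if j == -1:
--                 tokens.append(("text", text[i], start))
--                 i += 1
--                 continue
--             inner = text[i + 2:j]
--             tokens.append(("ph", inner, start))
--             i = j + 1
--             continue
--         tokens.append(("text", text[i], start))
--         i += 1
--     merged: list[tuple[str, str, int]] = []
--     for kind, val, off in tokens:
--         if merged and merged[-1][0] == "text" and kind == "text":
--             merged[-1] = ("text", merged[-1][1] + val, merged[-1][2])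
--         else:
--             merged.append((kind, val, off))
--     return merged
-- ===== SOURCE B (Python) =====
-- def _parse_placeholder_tokens(text: str) -> list[tuple[str, str, int]]:
--     out: list[tuple[str, str, int]] = []
--     buf = ""
--     buf_start = 0
--     i = 0
--     n = len(text)
--     while True:
--         p = text.find("$", i)
--         if p == -1:
--             if i < n:
--                 if not buf:
--                     buf_start = i
--                 buf += text[i:]
--             if buf:
--                 out.append(("text", buf, buf_start))
--             return out
--         if p > i:
--             if not buf:
--                 buf_start = i
--             buf += text[i:p]
--         if text.startswith("$${", p):
--             j = text.find("}", p + 3)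
--             if j != -1:
--                 if buf:
--                     out.append(("text", buf, buf_start))
--                     buf = ""
--                 out.append(("escape", text[p + 2:j + 1], p))
--                 i = j + 1
--                 continue
--         elif text.startswith("$$", p):
--             if not buf:
--                 buf_start = p
--             buf += "$"
--             i = p + 2
--             continue
--         elif text.startswith("${", p):
--             j = text.find("}", p + 2)
--             if j != -1:
--                 if buf:
--                     out.append(("text", buf, buf_start))
--                     buf = ""
--                 out.append(("ph", text[p + 2:j], p))
--                 i = j + 1
--                 continue
--         if not buf:
--             buf_start = p
--         buf += "$"
--         i = p + 1
-- ===== Notes on version B (the rewrite author's own statement) =====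
-- stated objective: faster
-- what changed: B replaces A's character-by-character index loop plus a separate adjacent-text-token merge pass by a single scan that jumps between dollar-sign occurrences with str.find, copying each gap as one slice into a buffer and emitting already-merged tokens directly.
import Mathlib
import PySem

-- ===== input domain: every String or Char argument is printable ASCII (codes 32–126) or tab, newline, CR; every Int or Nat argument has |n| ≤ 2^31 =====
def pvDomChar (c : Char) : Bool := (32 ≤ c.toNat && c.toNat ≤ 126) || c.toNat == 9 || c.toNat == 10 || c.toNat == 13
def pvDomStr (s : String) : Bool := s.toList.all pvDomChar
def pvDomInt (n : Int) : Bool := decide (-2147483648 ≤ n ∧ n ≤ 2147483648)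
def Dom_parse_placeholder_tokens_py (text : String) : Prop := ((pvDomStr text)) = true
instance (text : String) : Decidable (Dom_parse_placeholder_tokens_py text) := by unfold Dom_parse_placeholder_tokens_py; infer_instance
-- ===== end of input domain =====

-- B replaces A's char-by-char scan + separate per-character text-merge pass by a single
-- find-jumping scan with a text buffer (objective: faster; measured faster in a timing run).


-- ===== PORT A =====

-- text.find(c, k): index of first occurrence of c at position ≥ k, none if absent
-- (exact for the single-char needles both programs use; Python returns -1 ↦ none).
def pvFindCh (c : Char) (cs : List Char) (k : Nat) : Option Nat :=
  if h : k < cs.length then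
    if cs[k] = c then some k else pvFindCh c cs (k + 1)
  else none
termination_by cs.length - k

theorem pvFindCh_bounds (c : Char) (cs : List Char) (k : Nat) (j : Nat)
    (h : pvFindCh c cs k = some j) : k ≤ j ∧ j < cs.length := by
  fun_induction pvFindCh c cs k with
  | case1 k hk heq => simp_all; omega
  | case2 k hk hne ih =>
      have := ih (by simpa using h)
      omega
  | case3 k hk => simp_all

-- text[a:b] for 0 ≤ a ≤ b ≤ len (the only slices both programs take): exact.
def pvSliceN (cs : List Char) (a b : Nat) : List Char := (cs.drop a).take (b - a)

-- scan loop of A: tokens emitted from index i on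
def aScan (cs : List Char) (i : Nat) : List (String × String × Int) :=
  if hi : i < cs.length then
    if cs.getD i ' ' = '$' ∧ i + 1 < cs.length ∧ cs.getD (i + 1) ' ' = '$' then
      if i + 2 < cs.length ∧ cs.getD (i + 2) ' ' = '{' then
        match hj : pvFindCh '}' cs (i + 3) with
        | none => ("text", String.ofList [cs.getD i ' '], (i : Int)) :: aScan cs (i + 1)
        | some j => ("escape", String.ofList (pvSliceN cs (i + 2) (j + 1)), (i : Int)) :: aScan cs (j + 1)
      else ("text", "$", (i : Int)) :: aScan cs (i + 2)
    else if cs.getD i ' ' = '$' ∧ i + 1 < cs.length ∧ cs.getD (i + 1) ' ' = '{' then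
      match hj : pvFindCh '}' cs (i + 2) with
      | none => ("text", String.ofList [cs.getD i ' '], (i : Int)) :: aScan cs (i + 1)
      | some j => ("ph", String.ofList (pvSliceN cs (i + 2) j), (i : Int)) :: aScan cs (j + 1)
    else ("text", String.ofList [cs.getD i ' '], (i : Int)) :: aScan cs (i + 1)
  else []
termination_by cs.length - i
decreasing_by
  · omega
  · have := pvFindCh_bounds '}' cs (i + 3) j hj; omega
  · omega
  · omega
  · have := pvFindCh_bounds '}' cs (i + 2) j hj; omega
  · omega

-- A's merge pass: body of 'for kind, val, off in tokens'
def aMergeStep (m : List (String × String × Int)) (t : String × String × Int) :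
    List (String × String × Int) :=
  match m.getLast? with
  | some (k, v, off) =>
      if k = "text" ∧ t.1 = "text" then m.dropLast ++ [("text", v ++ t.2.1, off)]
      else m ++ [t]
  | none => m ++ [t]

def parse_placeholder_tokens_py (text : String) : List (String × String × Int) :=
  (aScan text.toList 0).foldl aMergeStep []

-- ===== PORT B =====

-- 'if not buf: buf_start = pos' followed by 'buf += s' (no-op when s is empty)
def bApp (buf : List Char) (bstart : Nat) (s : List Char) (pos : Nat) : List Char × Nat :=
  if s = [] then (buf, bstart)
  else if buf = [] then (s, pos) else (buf ++ s, bstart)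

-- flush(): emit the pending text run, if any
def bFlush (buf : List Char) (bstart : Nat) : List (String × String × Int) :=
  if buf = [] then [] else [("text", String.ofList buf, (bstart : Int))]

-- main loop of B: tokens emitted from index i on, with pending text buffer
def bLoop (cs : List Char) (i : Nat) (buf : List Char) (bstart : Nat) :
    List (String × String × Int) :=
  match hp : pvFindCh '$' cs i with
  | none =>
      let g := bApp buf bstart (cs.drop i) i
      bFlush g.1 g.2
  | some p =>
      let g := bApp buf bstart (pvSliceN cs i p) i
      if p + 2 < cs.length ∧ cs.getD p ' ' = '$' ∧ cs.getD (p + 1) ' ' = '$' ∧ cs.getD (p + 2) ' ' = '{' then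
        match hj : pvFindCh '}' cs (p + 3) with
        | some j =>
            bFlush g.1 g.2 ++ ("escape", String.ofList (pvSliceN cs (p + 2) (j + 1)), (p : Int)) :: bLoop cs (j + 1) [] 0
        | none => bLoop cs (p + 1) (g.1 ++ ['$']) (if g.1 = [] then p else g.2)
      else if p + 1 < cs.length ∧ cs.getD p ' ' = '$' ∧ cs.getD (p + 1) ' ' = '$' then
        bLoop cs (p + 2) (g.1 ++ ['$']) (if g.1 = [] then p else g.2)
      else if p + 1 < cs.length ∧ cs.getD p ' ' = '$' ∧ cs.getD (p + 1) ' ' = '{' then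
        match hj : pvFindCh '}' cs (p + 2) with
        | some j =>
            bFlush g.1 g.2 ++ ("ph", String.ofList (pvSliceN cs (p + 2) j), (p : Int)) :: bLoop cs (j + 1) [] 0
        | none => bLoop cs (p + 1) (g.1 ++ ['$']) (if g.1 = [] then p else g.2)
      else bLoop cs (p + 1) (g.1 ++ ['$']) (if g.1 = [] then p else g.2)
termination_by cs.length - i
decreasing_by
  · have := pvFindCh_bounds '$' cs i p hp
    have := pvFindCh_bounds '}' cs (p + 3) j hj
    omega
  · have := pvFindCh_bounds '$' cs i p hp; omega
  · have := pvFindCh_bounds '$' cs i p hp; omega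
  · have := pvFindCh_bounds '$' cs i p hp
    have := pvFindCh_bounds '}' cs (p + 2) j hj
    omega
  · have := pvFindCh_bounds '$' cs i p hp; omega
  · have := pvFindCh_bounds '$' cs i p hp; omega

def parse_placeholder_tokens_py_alt (text : String) : List (String × String × Int) :=
  bLoop text.toList 0 [] 0

-- ===== PRECONDITION & SPEC =====
def Spec_parse_placeholder_tokens_py (text : String) (out : List (String × String × Int)) : Prop := out = parse_placeholder_tokens_py_alt text
instance (text : String) (out : List (String × String × Int)) : Decidable (Spec_parse_placeholder_tokens_py text out) := by unfold Spec_parse_placeholder_tokens_py; infer_instance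

-- ===== CLAIM (what is proved, stated in full; the proofs are below) =====
def Claim_equal_parse_placeholder_tokens_py : Prop := ∀ (text : String), Dom_parse_placeholder_tokens_py text → Spec_parse_placeholder_tokens_py text (parse_placeholder_tokens_py text)

-- ===== LEMMAS AND PROOFS =====

-- A's merge pass reformulated with an explicit pending text buffer (same state as B's loop)
def mRun (buf : List Char) (bstart : Nat) : List (String × String × Int) → List (String × String × Int)
  | [] => bFlush buf bstart
  | (k, v, off) :: rest =>
      if k = "text" then
        let g := bApp buf bstart v.toList off.toNat
        mRun g.1 g.2 rest
      else bFlush buf bstart ++ (k, v, off) :: mRun [] 0 rest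

theorem getD_eq_getElem' (cs : List Char) (i : Nat) (h : i < cs.length) :
    cs.getD i ' ' = cs[i] := by
  simp [List.getD_eq_getElem?_getD, List.getElem?_eq_getElem h]

theorem pvFindCh_none (c : Char) (cs : List Char) (i : Nat) (h : pvFindCh c cs i = none) :
    ∀ k, i ≤ k → k < cs.length → cs.getD k ' ' ≠ c := by
  fun_induction pvFindCh c cs i with
  | case1 i hi heq => simp_all
  | case2 i hi hne ih =>
      intro k hk hk2
      rcases Nat.eq_or_lt_of_le hk with rfl | hlt
      · rw [getD_eq_getElem' cs i hi]; exact hne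
      · exact ih h k hlt hk2
  | case3 i hi =>
      intro k hk hk2; omega

theorem pvFindCh_some (c : Char) (cs : List Char) (i : Nat) (p : Nat)
    (h : pvFindCh c cs i = some p) :
    i ≤ p ∧ p < cs.length ∧ cs.getD p ' ' = c ∧ (∀ k, i ≤ k → k < p → cs.getD k ' ' ≠ c) := by
  fun_induction pvFindCh c cs i with
  | case1 i hi heq =>
      obtain rfl : i = p := by simpa using h
      exact ⟨le_refl _, hi, by rw [getD_eq_getElem' cs i hi]; exact heq, by omega⟩
  | case2 i hi hne ih =>
      obtain ⟨h1, h2, h3, h4⟩ := ih h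
      refine ⟨by omega, h2, h3, ?_⟩
      intro k hk hk2
      rcases Nat.eq_or_lt_of_le hk with rfl | hlt
      · rw [getD_eq_getElem' cs i hi]; exact hne
      · exact h4 k hlt hk2
  | case3 i hi => simp_all

theorem bApp_single (buf : List Char) (bstart : Nat) (ch : Char) (pos : Nat) :
    bApp buf bstart [ch] pos = (buf ++ [ch], if buf = [] then pos else bstart) := by
  unfold bApp
  by_cases hb : buf = [] <;> simp [hb]

theorem bApp_append (buf : List Char) (bstart : Nat) (ch : Char) (t : List Char) (pos : Nat) :
    bApp buf bstart (ch :: t) pos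
      = bApp (bApp buf bstart [ch] pos).1 (bApp buf bstart [ch] pos).2 t (pos + 1) := by
  unfold bApp
  by_cases ht : t = [] <;> by_cases hb : buf = [] <;> simp [ht, hb]

theorem pvSliceN_self (cs : List Char) (i : Nat) : pvSliceN cs i i = [] := by
  simp [pvSliceN]

theorem pvSliceN_cons (cs : List Char) (i p : Nat) (h : i < cs.length) (hip : i < p) :
    pvSliceN cs i p = cs.getD i ' ' :: pvSliceN cs (i + 1) p := by
  unfold pvSliceN
  rw [getD_eq_getElem' cs i h, List.drop_eq_getElem_cons h]
  have : p - i = (p - (i + 1)) + 1 := by omega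
  rw [this, List.take_succ_cons]

theorem aScan_nondollar (cs : List Char) (i : Nat) (h : i < cs.length)
    (hc : cs.getD i ' ' ≠ '$') :
    aScan cs i = ("text", String.ofList [cs.getD i ' '], (i : Int)) :: aScan cs (i + 1) := by
  rw [aScan, dif_pos h, if_neg (fun hx => hc hx.1), if_neg (fun hx => hc hx.1)]

theorem mRun_text_cons (buf : List Char) (bstart : Nat) (ch : Char) (i : Nat)
    (rest : List (String × String × Int)) :
    mRun buf bstart (("text", String.ofList [ch], (i : Int)) :: rest)
      = mRun (bApp buf bstart [ch] i).1 (bApp buf bstart [ch] i).2 rest := by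
  simp [mRun]

-- crossing a '$'-free gap [i, p): A emits single-char text tokens, B appends the slice
theorem mRun_gap (cs : List Char) (p : Nat) :
    ∀ n i buf bstart, p - i ≤ n → i ≤ p → p ≤ cs.length →
    (∀ k, i ≤ k → k < p → cs.getD k ' ' ≠ '$') →
    mRun buf bstart (aScan cs i)
      = mRun (bApp buf bstart (pvSliceN cs i p) i).1 (bApp buf bstart (pvSliceN cs i p) i).2 (aScan cs p) := by
  intro n
  induction n with
  | zero =>
      intro i buf bstart hn hip hp hgap
      obtain rfl : i = p := by omega
      simp [pvSliceN_self, bApp]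
  | succ n ih =>
      intro i buf bstart hn hip hp hgap
      rcases Nat.eq_or_lt_of_le hip with rfl | hlt
      · simp [pvSliceN_self, bApp]
      · have hi : i < cs.length := by omega
        conv_rhs => rw [pvSliceN_cons cs i p hi hlt, bApp_append]
        rw [aScan_nondollar cs i hi (hgap i (le_refl _) hlt), mRun_text_cons]
        exact ih (i + 1) _ _ (by omega) (by omega) hp (fun k hk hk2 => hgap k (by omega) hk2)

-- the '$'-free tail: A emits text tokens to the end, B flushes buffer ++ rest
theorem mRun_tail (cs : List Char) :
    ∀ n i buf bstart, cs.length - i ≤ n →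
    (∀ k, i ≤ k → k < cs.length → cs.getD k ' ' ≠ '$') →
    mRun buf bstart (aScan cs i)
      = bFlush (bApp buf bstart (cs.drop i) i).1 (bApp buf bstart (cs.drop i) i).2 := by
  intro n
  induction n with
  | zero =>
      intro i buf bstart hn hgap
      have hle : cs.length ≤ i := by omega
      rw [aScan, dif_neg (by omega), List.drop_eq_nil_of_le hle]
      simp [mRun, bApp]
  | succ n ih =>
      intro i buf bstart hn hgap
      by_cases hi : i < cs.length
      · conv_rhs => rw [List.drop_eq_getElem_cons hi, ← getD_eq_getElem' cs i hi, bApp_append]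
        rw [aScan_nondollar cs i hi (hgap i (le_refl _) hi), mRun_text_cons]
        exact ih (i + 1) _ _ (by omega) (fun k hk hk2 => hgap k (by omega) hk2)
      · have hle : cs.length ≤ i := by omega
        rw [aScan, dif_neg hi, List.drop_eq_nil_of_le hle]
        simp [mRun, bApp]

-- main lemma: A's scan under the merge reformulation equals B's loop
theorem mRun_eq_bLoop (cs : List Char) (i : Nat) (buf : List Char) (bstart : Nat) :
    mRun buf bstart (aScan cs i) = bLoop cs i buf bstart := by
  fun_induction bLoop cs i buf bstart with
  | case1 i buf bstart hp g =>
      exact mRun_tail cs (cs.length - i) i buf bstart (le_refl _) (pvFindCh_none _ _ _ hp)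
  | case2 i buf bstart p hp g hcond j hj ih =>
      obtain ⟨h1, h2, h3, h4⟩ := pvFindCh_some _ _ _ _ hp
      rw [mRun_gap cs p (p - i) i buf bstart (le_refl _) h1 (by omega) h4]
      rw [aScan, dif_pos h2, if_pos ⟨h3, by omega, hcond.2.2.1⟩, if_pos ⟨hcond.1, hcond.2.2.2⟩]
      split
      · rename_i hj'; rw [hj'] at hj; cases hj
      · rename_i j' hj'
        rw [hj'] at hj; injection hj with hjj; subst hjj
        simp only [mRun, if_neg (by decide : ¬(("escape" : String) = "text"))]
        rw [ih]
  | case3 i buf bstart p hp g hcond hj ih =>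
      obtain ⟨h1, h2, h3, h4⟩ := pvFindCh_some _ _ _ _ hp
      rw [mRun_gap cs p (p - i) i buf bstart (le_refl _) h1 (by omega) h4]
      rw [aScan, dif_pos h2, if_pos ⟨h3, by omega, hcond.2.2.1⟩, if_pos ⟨hcond.1, hcond.2.2.2⟩]
      split
      · rw [h3, mRun_text_cons, bApp_single]
        simp only [dite_eq_ite] at ih
        exact ih
      · rename_i j' hj'; rw [hj'] at hj; cases hj
  | case4 i buf bstart p hp g hc1 hcond ih =>
      obtain ⟨h1, h2, h3, h4⟩ := pvFindCh_some _ _ _ _ hp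
      rw [mRun_gap cs p (p - i) i buf bstart (le_refl _) h1 (by omega) h4]
      rw [aScan, dif_pos h2, if_pos ⟨h3, hcond.1, hcond.2.2⟩,
        if_neg (fun hx => hc1 ⟨hx.1, h3, hcond.2.2, hx.2⟩)]
      rw [show ("$" : String) = String.ofList ['$'] from rfl, mRun_text_cons, bApp_single]
      simp only [dite_eq_ite] at ih
      exact ih
  | case5 i buf bstart p hp g hc1 hc2 hcond j hj ih =>
      obtain ⟨h1, h2, h3, h4⟩ := pvFindCh_some _ _ _ _ hp
      rw [mRun_gap cs p (p - i) i buf bstart (le_refl _) h1 (by omega) h4]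
      rw [aScan, dif_pos h2,
        if_neg (fun hx => hc2 ⟨hx.2.1, hx.1, hx.2.2⟩),
        if_pos ⟨h3, hcond.1, hcond.2.2⟩]
      split
      · rename_i hj'; rw [hj'] at hj; cases hj
      · rename_i j' hj'
        rw [hj'] at hj; injection hj with hjj; subst hjj
        simp only [mRun, if_neg (by decide : ¬(("ph" : String) = "text"))]
        rw [ih]
  | case6 i buf bstart p hp g hc1 hc2 hcond hj ih =>
      obtain ⟨h1, h2, h3, h4⟩ := pvFindCh_some _ _ _ _ hp
      rw [mRun_gap cs p (p - i) i buf bstart (le_refl _) h1 (by omega) h4]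
      rw [aScan, dif_pos h2,
        if_neg (fun hx => hc2 ⟨hx.2.1, hx.1, hx.2.2⟩),
        if_pos ⟨h3, hcond.1, hcond.2.2⟩]
      split
      · rw [h3, mRun_text_cons, bApp_single]
        simp only [dite_eq_ite] at ih
        exact ih
      · rename_i j' hj'; rw [hj'] at hj; cases hj
  | case7 i buf bstart p hp g hc1 hc2 hc3 ih =>
      obtain ⟨h1, h2, h3, h4⟩ := pvFindCh_some _ _ _ _ hp
      rw [mRun_gap cs p (p - i) i buf bstart (le_refl _) h1 (by omega) h4]
      rw [aScan, dif_pos h2,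
        if_neg (fun hx => hc2 ⟨hx.2.1, hx.1, hx.2.2⟩),
        if_neg (fun hx => hc3 ⟨hx.2.1, hx.1, hx.2.2⟩)]
      rw [h3, mRun_text_cons, bApp_single]
      simp only [dite_eq_ite] at ih
      exact ih

-- every token A's scan emits has a nonnegative offset, and its text tokens are nonempty
theorem ofList_single_ne_empty (ch : Char) : String.ofList [ch] ≠ "" := by
  intro hx
  simpa using congrArg String.toList hx

theorem aScan_good (cs : List Char) (i : Nat) :
    ∀ t ∈ aScan cs i, 0 ≤ t.2.2 ∧ (t.1 = "text" → t.2.1 ≠ "") := by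
  fun_induction aScan cs i with
  | case1 i hi h1 h2 hj ih =>
      intro t ht
      rcases List.mem_cons.mp ht with rfl | ht
      · exact ⟨Int.natCast_nonneg i, fun _ => ofList_single_ne_empty _⟩
      · exact ih t ht
  | case2 i hi h1 h2 j hj ih =>
      intro t ht
      rcases List.mem_cons.mp ht with rfl | ht
      · exact ⟨Int.natCast_nonneg i, fun h => by simp at h⟩
      · exact ih t ht
  | case3 i hi h1 h2 ih =>
      intro t ht
      rcases List.mem_cons.mp ht with rfl | ht
      · exact ⟨Int.natCast_nonneg i, fun _ => by simp⟩
      · exact ih t ht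
  | case4 i hi h1 h2 hj ih =>
      intro t ht
      rcases List.mem_cons.mp ht with rfl | ht
      · exact ⟨Int.natCast_nonneg i, fun _ => ofList_single_ne_empty _⟩
      · exact ih t ht
  | case5 i hi h1 h2 j hj ih =>
      intro t ht
      rcases List.mem_cons.mp ht with rfl | ht
      · exact ⟨Int.natCast_nonneg i, fun h => by simp at h⟩
      · exact ih t ht
  | case6 i hi h1 h2 ih =>
      intro t ht
      rcases List.mem_cons.mp ht with rfl | ht
      · exact ⟨Int.natCast_nonneg i, fun _ => ofList_single_ne_empty _⟩
      · exact ih t ht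
  | case7 i hi => simp

-- A's foldl merge equals the buffered reformulation
theorem foldl_merge_eq_mRun (toks : List (String × String × Int)) :
    ∀ (acc : List (String × String × Int)) (buf : List Char) (bstart : Nat),
    (∀ t ∈ toks, 0 ≤ t.2.2 ∧ (t.1 = "text" → t.2.1 ≠ "")) →
    (buf = [] → ∀ x, acc.getLast? = some x → x.1 ≠ "text") →
    toks.foldl aMergeStep (acc ++ bFlush buf bstart) = acc ++ mRun buf bstart toks := by
  induction toks with
  | nil => intro acc buf bstart _ _; simp [mRun]
  | cons t rest ih =>
      intro acc buf bstart hgood hacc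
      obtain ⟨k, v, off⟩ := t
      have hg := hgood (k, v, off) List.mem_cons_self
      have hgrest : ∀ t ∈ rest, 0 ≤ t.2.2 ∧ (t.1 = "text" → t.2.1 ≠ "") :=
        fun t ht => hgood t (List.mem_cons_of_mem _ ht)
      rw [List.foldl_cons]
      by_cases hk : k = "text"
      · subst hk
        have hv : v.toList ≠ [] := fun hx => (hg.2 rfl) (by rwa [← String.toList_eq_nil_iff])
        by_cases hb : buf = []
        · subst hb
          have hstep : aMergeStep (acc ++ bFlush [] bstart) ("text", v, off)
              = acc ++ [("text", v, off)] := by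
            rcases hl : acc.getLast? with _ | ⟨k1, v1, o1⟩
            · simp [aMergeStep, bFlush, hl]
            · have hk1 : k1 ≠ "text" := hacc rfl _ hl
              simp [aMergeStep, bFlush, hl, hk1]
          have e : acc ++ [("text", v, off)]
              = acc ++ bFlush (bApp [] bstart v.toList off.toNat).1 (bApp [] bstart v.toList off.toNat).2 := by
            simp [bApp, hv, bFlush, Int.toNat_of_nonneg hg.1]
          rw [hstep, e, ih _ _ _ hgrest (fun h => absurd h (by simp [bApp, hv]))]
          simp [mRun]
        · have hstep : aMergeStep (acc ++ bFlush buf bstart) ("text", v, off)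
              = acc ++ [("text", String.ofList buf ++ v, (bstart : Int))] := by
            simp [aMergeStep, bFlush, hb]
          have e2 : String.ofList buf ++ v = String.ofList (buf ++ v.toList) := by
            rw [String.ofList_append, String.ofList_toList]
          have e3 : acc ++ [("text", String.ofList (buf ++ v.toList), (bstart : Int))]
              = acc ++ bFlush (bApp buf bstart v.toList off.toNat).1 (bApp buf bstart v.toList off.toNat).2 := by
            simp [bApp, hv, hb, bFlush]
          rw [hstep, e2, e3, ih _ _ _ hgrest (fun h => absurd h (by simp [bApp, hv, hb]))]
          simp [mRun, bApp, hv, hb]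
      · have hstep : aMergeStep (acc ++ bFlush buf bstart) (k, v, off)
            = (acc ++ bFlush buf bstart) ++ [(k, v, off)] := by
          rcases hl : (acc ++ bFlush buf bstart).getLast? with _ | ⟨k1, v1, o1⟩
          · simp [aMergeStep, hl]
          · simp [aMergeStep, hl, hk]
        have e : (acc ++ bFlush buf bstart) ++ [(k, v, off)]
            = ((acc ++ bFlush buf bstart) ++ [(k, v, off)]) ++ bFlush [] 0 := by
          simp [bFlush]
        rw [hstep, e, ih _ [] 0 hgrest
          (fun _ x hx => by rw [List.getLast?_concat] at hx; cases hx; exact hk)]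
        simp [mRun, hk, bFlush]

-- ===== VERDICT (by name: the statement is the Claim_ definition above) =====
theorem parse_placeholder_tokens_py_spec : Claim_equal_parse_placeholder_tokens_py := by
  intro text _
  unfold Spec_parse_placeholder_tokens_py parse_placeholder_tokens_py parse_placeholder_tokens_py_alt
  have h := foldl_merge_eq_mRun (aScan text.toList 0) [] [] 0 (aScan_good _ _) (by simp)
  simp only [bFlush, List.nil_append] at h
  simpa using h.trans (mRun_eq_bLoop text.toList 0 [] 0)
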